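-- pv_equiv track=rewrite | github.com/FlightLLM/flightllm_test_demo | profile/utils/tools.py | tiling_to_list
-- ===== SOURCE A (Python) =====
-- def tiling_to_list(start_id, end_id, split_unit):
--     # return a list of tiling tuple: [(tiling_start_id, tiling_end_id)]
--     # example: start_id = 1, end_id = 11, split_unit = 3
--     # return [(1, 4), (4, 7), (7, 10), (10, 11)]
--     assert end_id > start_id
--     assert start_id >= 0
--     assert split_unit >= 0
--
--     tiling_start_end_id_list = list()
--     tiling_start_id = None
--     tiling_end_id = start_id
--     for i in range(start_id, end_id + split_unit, split_unit):
--         tiling_start_id = tiling_end_id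
--         tiling_end_id = min(i, end_id)
--         if i > start_id:
--             tiling_start_end_id_list.append((tiling_start_id, tiling_end_id, ))
--     return tiling_start_end_id_list
-- ===== SOURCE B (Python) =====
-- def tiling_to_list(start_id, end_id, split_unit):
--     assert end_id > start_id
--     assert start_id >= 0
--     assert split_unit >= 0
--     return [(s, min(s + split_unit, end_id)) for s in range(start_id, end_id, split_unit)]
-- ===== Notes on version B (the rewrite author's own statement) =====
-- stated objective: simpler
-- what changed: Replaces the accumulator-threaded while-style loop (carried tiling_end_id, skip-first guard, range up to end_id+split_unit) by a stateless comprehension over range(start_id, end_id, split_unit) computing each tile (s, min(s+split_unit, end_id)) independently from its own start.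
import Mathlib
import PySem

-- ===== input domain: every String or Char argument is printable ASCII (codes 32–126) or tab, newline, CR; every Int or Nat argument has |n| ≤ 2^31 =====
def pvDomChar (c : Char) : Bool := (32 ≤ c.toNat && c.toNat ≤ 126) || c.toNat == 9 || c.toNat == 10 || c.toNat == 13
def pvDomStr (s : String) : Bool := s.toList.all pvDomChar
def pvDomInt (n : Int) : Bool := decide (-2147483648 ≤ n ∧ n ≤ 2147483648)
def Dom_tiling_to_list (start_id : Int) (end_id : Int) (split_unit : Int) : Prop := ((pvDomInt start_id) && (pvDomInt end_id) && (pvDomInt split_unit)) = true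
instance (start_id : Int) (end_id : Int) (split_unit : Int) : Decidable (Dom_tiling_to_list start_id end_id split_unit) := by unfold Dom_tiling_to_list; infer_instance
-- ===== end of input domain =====

-- B replaces A's state-threaded loop (carried tiling_end_id, skip-first guard, range to
-- end_id+split_unit) by a stateless map over the tile starts range(start_id, end_id, split_unit),
-- computing each tile's end directly as min(s+split_unit, end_id); same cost, simpler.


-- ===== PORT A =====
-- literal port of A's loop: state = (tiling_end_id, accumulated list); the tuple appended is
-- (old tiling_end_id, min i end_id), guarded by i > start_id
def tiling_to_list (start_id : Int) (end_id : Int) (split_unit : Int) : List (Int × Int) :=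
  ((PySem.List.pyRange start_id (end_id + split_unit) split_unit).foldl
      (fun (st : Int × List (Int × Int)) i =>
        (min i end_id,
         if start_id < i then st.2 ++ [(st.1, min i end_id)] else st.2))
      (start_id, ([] : List (Int × Int)))).2

-- ===== PORT B =====
def tiling_to_list_alt (start_id : Int) (end_id : Int) (split_unit : Int) : List (Int × Int) :=
  (PySem.List.pyRange start_id end_id split_unit).map
    (fun s => (s, min (s + split_unit) end_id))

-- ===== PRECONDITION & SPEC =====
-- Pre_ is exactly where A returns: the three asserts (end_id > start_id, start_id ≥ 0,
-- split_unit ≥ 0) raise AssertionError, and split_unit = 0 makes range() raise ValueError.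
def Pre_tiling_to_list (start_id : Int) (end_id : Int) (split_unit : Int) : Prop :=
  0 ≤ start_id ∧ start_id < end_id ∧ 0 < split_unit
instance (start_id : Int) (end_id : Int) (split_unit : Int) : Decidable (Pre_tiling_to_list start_id end_id split_unit) := by unfold Pre_tiling_to_list; infer_instance

def pvWitness_tiling_to_list : Int × Int × Int := (1, 11, 3)

def Spec_tiling_to_list (start_id : Int) (end_id : Int) (split_unit : Int) (out : List (Int × Int)) : Prop := out = tiling_to_list_alt start_id end_id split_unit
instance (start_id : Int) (end_id : Int) (split_unit : Int) (out : List (Int × Int)) : Decidable (Spec_tiling_to_list start_id end_id split_unit out) := by unfold Spec_tiling_to_list; infer_instance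

-- ===== CLAIM (what is proved, stated in full; the proofs are below) =====
def Claim_equal_tiling_to_list : Prop := ∀ (start_id : Int) (end_id : Int) (split_unit : Int), Dom_tiling_to_list start_id end_id split_unit → Pre_tiling_to_list start_id end_id split_unit → Spec_tiling_to_list start_id end_id split_unit (tiling_to_list start_id end_id split_unit)

-- ===== LEMMAS AND PROOFS =====

-- cons form of pyRange for an arbitrary positive step
lemma pyRange_pos_cons (a b s : Int) (hs : 0 < s) (hab : a < b) :
    PySem.List.pyRange a b s = a :: PySem.List.pyRange (a + s) b s := by
  rw [PySem.List.pyRange_of_pos _ _ hs, PySem.List.pyRange_of_pos _ _ hs]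
  have key : ∀ m : Nat, ((b - a + s - 1) / s).toNat = m + 1 →
      List.map (fun k : Nat => a + s * (k : Int)) (List.range (m + 1))
        = a :: List.map (fun k : Nat => a + s + s * (k : Int)) (List.range m) := by
    intro m _
    rw [List.range_succ_eq_map, List.map_cons, List.map_map]
    refine congrArg₂ _ (by simp) ?_
    apply List.map_congr_left
    intro k _
    simp only [Function.comp]
    push_cast
    ring
  by_cases h : a + s < b
  · have h2 : 0 ≤ (b - (a + s) + s - 1) / s := Int.ediv_nonneg (by omega) (by omega)
    have h1 : (b - a + s - 1) / s = (b - (a + s) + s - 1) / s + 1 := by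
      have e1 : b - a + s - 1 = (b - (a + s) + s - 1) + 1 * s := by ring
      rw [e1, Int.add_mul_ediv_right _ _ (by omega : s ≠ 0)]
    rw [if_pos hab, if_pos h,
        show ((b - a + s - 1) / s).toNat = ((b - (a + s) + s - 1) / s).toNat + 1 from by omega]
    exact key ((b - (a + s) + s - 1) / s).toNat (by omega)
  · have h1 : (b - a + s - 1) / s = 1 := by
      have e1 : b - a + s - 1 = (b - a - 1) + 1 * s := by ring
      rw [e1, Int.add_mul_ediv_right _ _ (by omega : s ≠ 0),
          Int.ediv_eq_zero_of_lt (by omega) (by omega)]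
      omega
    rw [if_pos hab, if_neg (by omega : ¬ a + s < b),
        show ((b - a + s - 1) / s).toNat = 0 + 1 from by omega]
    exact key 0 (by omega)

lemma loop_eq (st e s0 : Int) (hs : 0 < s0) : ∀ (n : Nat) (a : Int) (acc : List (Int × Int)),
    (e - a).toNat ≤ n → st < a + s0 →
    ((PySem.List.pyRange (a + s0) (e + s0) s0).foldl
        (fun (p : Int × List (Int × Int)) i =>
          (min i e, if st < i then p.2 ++ [(p.1, min i e)] else p.2))
        (a, acc)).2
      = acc ++ (PySem.List.pyRange a e s0).map (fun t => (t, min (t + s0) e)) := by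
  intro n
  induction n with
  | zero =>
    intro a acc hn _
    have he : e ≤ a := by omega
    have h1 : PySem.List.pyRange a e s0 = [] := by
      rw [PySem.List.pyRange_of_pos _ _ hs, if_neg (by omega)]; simp
    have h2 : PySem.List.pyRange (a + s0) (e + s0) s0 = [] := by
      rw [PySem.List.pyRange_of_pos _ _ hs, if_neg (by omega)]; simp
    simp [h1, h2]
  | succ n ih =>
    intro a acc hn hst
    by_cases he : e ≤ a
    · have h1 : PySem.List.pyRange a e s0 = [] := by
        rw [PySem.List.pyRange_of_pos _ _ hs, if_neg (by omega)]; simp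
      have h2 : PySem.List.pyRange (a + s0) (e + s0) s0 = [] := by
        rw [PySem.List.pyRange_of_pos _ _ hs, if_neg (by omega)]; simp
      simp [h1, h2]
    · rw [not_le] at he
      rw [pyRange_pos_cons a e s0 hs he,
          pyRange_pos_cons (a + s0) (e + s0) s0 hs (by omega)]
      simp only [List.foldl_cons, List.map_cons, if_pos (by omega : st < a + s0)]
      by_cases hle : a + s0 ≤ e
      · have hmin : min (a + s0) e = a + s0 := by omega
        rw [hmin]
        have := ih (a + s0) (acc ++ [(a, a + s0)]) (by omega) (by omega)
        simp only [add_assoc] at this ⊢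
        rw [this]
        simp
      · -- last, short tile: both remaining ranges are empty
        have hmin : min (a + s0) e = e := by omega
        have h1 : PySem.List.pyRange (a + s0) e s0 = [] := by
          rw [PySem.List.pyRange_of_pos _ _ hs, if_neg (by omega)]; simp
        have h2 : PySem.List.pyRange (a + s0 + s0) (e + s0) s0 = [] := by
          rw [PySem.List.pyRange_of_pos _ _ hs, if_neg (by omega)]; simp
        rw [hmin, h1, h2]
        simp

-- ===== VERDICT (by name: the statement is the Claim_ definition above) =====
theorem tiling_to_list_spec : Claim_equal_tiling_to_list := by
  intro start_id end_id split_unit _ hpre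
  obtain ⟨h0, hlt, hs⟩ := hpre
  unfold Spec_tiling_to_list tiling_to_list tiling_to_list_alt
  rw [pyRange_pos_cons start_id (end_id + split_unit) split_unit hs (by omega)]
  simp only [List.foldl_cons, if_neg (lt_irrefl start_id),
    min_eq_left (by omega : start_id ≤ end_id)]
  exact loop_eq start_id end_id split_unit hs (end_id - start_id).toNat start_id []
    (le_refl _) (by omega)
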